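-- pv_equiv track=rewrite | github.com/vh42720/hackerrank | week_5/grid_challenge.py | gridChallenge
-- ===== SOURCE A (Python) =====
-- def gridChallenge(grid):
-- 	sort_grid = []
-- 	col_grid = [''] * len(grid[0])
--
-- 	for x in grid:
-- 		letters = [l for l in x]
-- 		letters.sort()
-- 		sort_grid.append(''.join(letters))
-- 		for idx, col in enumerate(letters):
-- 			col_grid[idx] += col
--
-- 	for y in col_grid:
-- 		if y != ''.join(sorted(y)):
-- 			return 'NO'
--
-- 	return 'YES'
-- ===== SOURCE B (Python) =====
-- def gridChallenge(grid):
--     last = [None] * len(grid[0])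
--     for row in grid:
--         for i, ch in enumerate(sorted(row)):
--             if last[i] is not None and ch < last[i]:
--                 return 'NO'
--             last[i] = ch
--     return 'YES'
-- ===== Notes on version B (the rewrite author's own statement) =====
-- stated objective: faster
-- what changed: B drops A's column-string building and per-column re-sorting: it keeps one 'last seen character' per column and checks each sorted row against it in a single linear pass, so only rows are ever sorted.
import Mathlib
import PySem

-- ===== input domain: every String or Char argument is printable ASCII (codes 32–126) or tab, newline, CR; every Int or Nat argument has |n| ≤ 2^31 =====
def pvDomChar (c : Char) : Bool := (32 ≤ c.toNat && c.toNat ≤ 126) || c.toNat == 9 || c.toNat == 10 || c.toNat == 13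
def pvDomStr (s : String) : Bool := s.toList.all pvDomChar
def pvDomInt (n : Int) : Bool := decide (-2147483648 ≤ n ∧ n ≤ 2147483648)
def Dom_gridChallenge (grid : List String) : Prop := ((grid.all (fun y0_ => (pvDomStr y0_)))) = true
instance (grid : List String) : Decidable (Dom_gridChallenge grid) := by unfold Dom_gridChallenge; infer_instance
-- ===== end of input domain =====

-- B replaces A's per-column string building + per-column sort with a single pass
-- keeping each column's last character; objective: faster (drops the per-column sorts).


-- ===== PORT A =====
-- inner loop 'for idx, col in enumerate(letters): col_grid[idx] += col'
-- (List.set is a no-op out of range, where Python raises IndexError — excluded by Pre_)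
def pvAddRow (cg : List String) (letters : List Char) (idx : Nat) : List String :=
  match letters with
  | [] => cg
  | c :: cs => pvAddRow (cg.set idx (cg.getD idx "" ++ String.singleton c)) cs (idx + 1)

-- body of 'for x in grid', state = (sort_grid, col_grid)
def pvFillStep (st : List String × List String) (x : String) : List String × List String :=
  let letters := PySem.List.sorted x.toList (fun c => c) false
  (st.1 ++ [String.ofList letters], pvAddRow st.2 letters 0)

-- 'for y in col_grid: if y != ''.join(sorted(y)): return 'NO''
def pvCheckCols : List String → String
  | [] => "YES"
  | y :: ys =>
    if y ≠ String.ofList (PySem.List.sorted y.toList (fun c => c) false) then "NO" else pvCheckCols ys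

def gridChallenge (grid : List String) : String :=
  match grid with
  | [] => ""  -- Python raises IndexError on len(grid[0]); outside Pre_
  | r0 :: _ =>
    let st := grid.foldl pvFillStep ([], List.replicate r0.length "")
    pvCheckCols st.2

-- ===== PORT B =====
-- inner loop 'for i, ch in enumerate(sorted(row))': none = early 'NO' return
-- (also produced when last[i] would raise IndexError in Python — outside Pre_)
def pvRowLoop : List Char → List (Option Char) → Nat → Option (List (Option Char))
  | [], last, _ => some last
  | c :: cs, last, i =>
    match last[i]? with
    | none => none
    | some entry =>
      if (match entry with | some p => decide (c < p) | none => false) then none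
      else pvRowLoop cs (last.set i (some c)) (i + 1)

def pvBLoop : List String → List (Option Char) → String
  | [], _ => "YES"
  | row :: rest, last =>
    match pvRowLoop (PySem.List.sorted row.toList (fun c => c) false) last 0 with
    | none => "NO"
    | some last' => pvBLoop rest last'

def gridChallenge_alt (grid : List String) : String :=
  match grid with
  | [] => ""
  | r0 :: _ => pvBLoop grid (List.replicate r0.length none)

-- ===== PRECONDITION & SPEC =====
-- Pre_ excludes exactly the inputs where A raises IndexError: the empty grid
-- (grid[0]) and grids with a row longer than the first row (col_grid[idx]).
def Pre_gridChallenge (grid : List String) : Prop :=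
  grid ≠ [] ∧ ∀ s ∈ grid, s.length ≤ (grid.headD "").length
instance (grid : List String) : Decidable (Pre_gridChallenge grid) := by
  unfold Pre_gridChallenge; infer_instance

def pvWitness_gridChallenge : List String := ["ba", "cd"]

def Spec_gridChallenge (grid : List String) (out : String) : Prop := out = gridChallenge_alt grid
instance (grid : List String) (out : String) : Decidable (Spec_gridChallenge grid out) := by unfold Spec_gridChallenge; infer_instance

-- ===== CLAIM (what is proved, stated in full; the proofs are below) =====
def Claim_equal_gridChallenge : Prop := ∀ (grid : List String), Dom_gridChallenge grid → Pre_gridChallenge grid → Spec_gridChallenge grid (gridChallenge grid)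

-- ===== LEMMAS AND PROOFS =====

-- the i-th column of a list of (sorted) rows
def pvCol (i : Nat) (rows : List (List Char)) : List Char :=
  rows.filterMap (fun r => r[i]?)

def pvSortF (s : String) : List Char := PySem.List.sorted s.toList (fun c => c) false

def pvOptL : Option Char → List Char
  | none => []
  | some c => [c]

def pvOkB (o : Option Char) (c : Char) : Bool :=
  match o with
  | some p => decide (p ≤ c)
  | none => true

theorem pvSortF_length (s : String) : (pvSortF s).length = s.length := by
  simp [pvSortF, PySem.List.length_sorted]

theorem pvAddRow_length (letters : List Char) : ∀ (cg : List String) (idx : Nat),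
    (pvAddRow cg letters idx).length = cg.length := by
  induction letters with
  | nil => intro cg idx; simp [pvAddRow]
  | cons c cs ih => intro cg idx; simp [pvAddRow, ih]

theorem pvCol_cons_lt (i : Nat) (r : List Char) (rs : List (List Char)) (h : i < r.length) :
    pvCol i (r :: rs) = r.getD i 'a' :: pvCol i rs := by
  simp [pvCol, List.filterMap_cons, List.getElem?_eq_getElem h, List.getD_eq_getElem?_getD]

theorem pvCol_cons_ge (i : Nat) (r : List Char) (rs : List (List Char)) (h : r.length ≤ i) :
    pvCol i (r :: rs) = pvCol i rs := by
  simp [pvCol, List.filterMap_cons, List.getElem?_eq_none h]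

theorem pvGetD_set_ne {α : Type} (xs : List α) (j k : Nat) (v d : α) (h : j ≠ k) :
    (xs.set j v).getD k d = xs.getD k d := by
  simp [List.getD_eq_getElem?_getD, List.getElem?_set_ne h]

theorem pvGetD_set_self {α : Type} (xs : List α) (j : Nat) (v d : α) (h : j < xs.length) :
    (xs.set j v).getD j d = v := by
  simp [List.getD_eq_getElem?_getD, h]

theorem pvAddRow_getD (letters : List Char) : ∀ (cg : List String) (idx i : Nat),
    idx + letters.length ≤ cg.length →
    ((pvAddRow cg letters idx).getD i "").toList =
      (cg.getD i "").toList ++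
        (if idx ≤ i ∧ i < idx + letters.length then [letters.getD (i - idx) 'a'] else []) := by
  induction letters with
  | nil =>
    intro cg idx i h
    simp only [pvAddRow, List.length_nil]
    rw [if_neg (by omega)]; simp
  | cons c cs ih =>
    intro cg idx i h
    simp only [pvAddRow]
    rw [ih _ (idx + 1) i (by simp only [List.length_cons, List.length_set] at h ⊢; omega)]
    by_cases hi : i = idx
    · subst hi
      rw [pvGetD_set_self _ _ _ _ (by simp only [List.length_cons] at h; omega)]
      rw [if_neg (by omega), if_pos (by simp only [List.length_cons]; omega)]
      simp
    · rw [pvGetD_set_ne _ _ _ _ _ (by omega : idx ≠ i)]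
      by_cases hin : idx + 1 ≤ i ∧ i < idx + 1 + cs.length
      · rw [if_pos hin, if_pos (by simp; omega)]
        have hsub : i - idx = (i - (idx + 1)) + 1 := by omega
        simp [hsub]
      · rw [if_neg hin, if_neg (by simp; omega)]

def pvFillF (cg : List String) (x : String) : List String := pvAddRow cg (pvSortF x) 0

theorem pvFill_snd (rows : List String) : ∀ (sg cg : List String),
    (rows.foldl pvFillStep (sg, cg)).2 = rows.foldl pvFillF cg := by
  induction rows with
  | nil => intro sg cg; simp
  | cons r rs ih => intro sg cg; simp [pvFillStep, pvFillF, pvSortF, ih]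

theorem pvFill_length (rows : List String) : ∀ (cg : List String),
    (rows.foldl pvFillF cg).length = cg.length := by
  induction rows with
  | nil => intro cg; simp
  | cons r rs ih => intro cg; simp [pvFillF, ih, pvAddRow_length]

theorem pvFill_getD (rows : List String) : ∀ (cg : List String) (i : Nat),
    (∀ r ∈ rows, r.length ≤ cg.length) → i < cg.length →
    ((rows.foldl pvFillF cg).getD i "").toList =
      (cg.getD i "").toList ++ pvCol i (rows.map pvSortF) := by
  induction rows with
  | nil => intro cg i _ _; simp [pvCol]
  | cons r rs ih =>
    intro cg i h hi
    simp only [List.foldl_cons, List.map_cons]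
    have hlen : (pvFillF cg r).length = cg.length := by simp [pvFillF, pvAddRow_length]
    rw [ih _ i (by intro x hx; rw [hlen]; exact h x (List.mem_cons_of_mem _ hx)) (by omega)]
    have hr : r.length ≤ cg.length := h r List.mem_cons_self
    have hadd := pvAddRow_getD (pvSortF r) cg 0 i (by simp [pvSortF_length]; omega)
    simp only [pvFillF]
    rw [hadd]
    by_cases hlt : i < (pvSortF r).length
    · rw [pvCol_cons_lt _ _ _ hlt, if_pos (by constructor <;> omega)]
      simp
    · rw [pvCol_cons_ge _ _ _ (by omega), if_neg (by simp; omega)]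
      simp

theorem pvCheckCols_eq (cg : List String) :
    pvCheckCols cg = if ∀ y ∈ cg, y.toList.Pairwise (· ≤ ·) then "YES" else "NO" := by
  induction cg with
  | nil => simp [pvCheckCols]
  | cons y ys ih =>
    have hiff : (y = String.ofList (PySem.List.sorted y.toList (fun c => c) false)) ↔
        y.toList.Pairwise (· ≤ ·) := by
      constructor
      · intro he
        have ht := congrArg String.toList he
        simp at ht
        rw [ht]
        have hp := PySem.List.sorted_pairwise (xs := y.toList) (key := fun c : Char => c)
        simpa using hp
      · intro hp
        rw [PySem.List.sorted_eq_self_of_pairwise y.toList (fun c => c) hp]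
        simp
    simp only [pvCheckCols, ih, ne_eq]
    by_cases hy : y.toList.Pairwise (· ≤ ·)
    · rw [if_neg (by simpa [hiff] using hy)]
      by_cases hys : ∀ z ∈ ys, z.toList.Pairwise (· ≤ ·)
      · rw [if_pos hys, if_pos (by
          intro z hz
          rcases List.mem_cons.mp hz with rfl | hz'
          · exact hy
          · exact hys z hz')]
      · rw [if_neg hys, if_neg (by
          intro hall
          exact hys fun z hz => hall z (List.mem_cons_of_mem _ hz))]
    · rw [if_pos (by simpa [hiff] using hy), if_neg (by
        intro hall
        exact hy (hall y List.mem_cons_self))]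

def pvWriteSeg : List (Option Char) → List Char → Nat → List (Option Char)
  | last, [], _ => last
  | last, c :: cs, i => pvWriteSeg (last.set i (some c)) cs (i + 1)

theorem pvWriteSeg_length (s : List Char) : ∀ (last : List (Option Char)) (i : Nat),
    (pvWriteSeg last s i).length = last.length := by
  induction s with
  | nil => intro last i; simp [pvWriteSeg]
  | cons c cs ih => intro last i; simp [pvWriteSeg, ih]

theorem pvWriteSeg_getD (s : List Char) : ∀ (last : List (Option Char)) (i k : Nat),
    i + s.length ≤ last.length →
    (pvWriteSeg last s i).getD k none =
      if i ≤ k ∧ k < i + s.length then some (s.getD (k - i) 'a') else last.getD k none := by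
  induction s with
  | nil =>
    intro last i k h
    simp only [pvWriteSeg, List.length_nil]
    rw [if_neg (by omega)]
  | cons c cs ih =>
    intro last i k h
    simp only [pvWriteSeg]
    rw [ih _ (i + 1) k (by simp only [List.length_cons, List.length_set] at h ⊢; omega)]
    by_cases hk : k = i
    · subst hk
      rw [if_neg (by omega), if_pos (by simp only [List.length_cons]; omega)]
      rw [pvGetD_set_self _ _ _ _ (by simp only [List.length_cons] at h; omega)]
      simp
    · rw [pvGetD_set_ne _ _ _ _ _ (by omega : i ≠ k)]
      by_cases hin : i + 1 ≤ k ∧ k < i + 1 + cs.length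
      · rw [if_pos hin, if_pos (by simp; omega)]
        have hsub : k - i = (k - (i + 1)) + 1 := by omega
        simp [hsub]
      · rw [if_neg hin, if_neg (by simp; omega)]

theorem pvRowLoop_spec (s : List Char) : ∀ (last : List (Option Char)) (i : Nat),
    i + s.length ≤ last.length →
    pvRowLoop s last i =
      if ∀ j, j < s.length → pvOkB (last.getD (i + j) none) (s.getD j 'a') = true
      then some (pvWriteSeg last s i) else none := by
  induction s with
  | nil => intro last i h; simp [pvRowLoop, pvWriteSeg]
  | cons c cs ih =>
    intro last i h
    simp only [pvRowLoop]
    have hi : i < last.length := by simp only [List.length_cons] at h; omega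
    rw [List.getElem?_eq_getElem hi]
    have hgd : last.getD i none = last[i] := by
      simp [List.getD_eq_getElem?_getD, List.getElem?_eq_getElem hi]
    by_cases hok : pvOkB last[i] c = true
    · have hb : (match last[i] with | some p => decide (c < p) | none => false) = false := by
        cases hx : last[i] with
        | none => rfl
        | some p =>
          rw [hx] at hok
          simp only [pvOkB, decide_eq_true_iff] at hok
          simpa using hok
      simp only [hb, Bool.false_eq_true, if_false]
      rw [ih _ (i + 1) (by simp only [List.length_cons, List.length_set] at h ⊢; omega)]
      have hcond : (∀ j, j < cs.length → pvOkB ((last.set i (some c)).getD (i + 1 + j) none) (cs.getD j 'a') = true) ↔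
          (∀ j, j < (c :: cs).length → pvOkB (last.getD (i + j) none) ((c :: cs).getD j 'a') = true) := by
        constructor
        · intro hc j hj
          cases j with
          | zero =>
            simp only [Nat.add_zero, List.getD_cons_zero]
            rw [hgd]; exact hok
          | succ j' =>
            have h1 := hc j' (by simp only [List.length_cons] at hj; omega)
            rw [pvGetD_set_ne _ _ _ _ _ (by omega : i ≠ i + 1 + j')] at h1
            have harith : i + 1 + j' = i + (j' + 1) := by omega
            rw [harith] at h1
            simpa using h1
        · intro hc j hj
          have h1 := hc (j + 1) (by simp only [List.length_cons] at hj ⊢; omega)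
          rw [pvGetD_set_ne _ _ _ _ _ (by omega : i ≠ i + 1 + j)]
          have harith : i + (j + 1) = i + 1 + j := by omega
          rw [harith] at h1
          simpa using h1
      rw [if_congr hcond rfl rfl]
      rfl
    · have hb : (match last[i] with | some p => decide (c < p) | none => false) = true := by
        cases hx : last[i] with
        | none => exact absurd (by rw [hx]; rfl) hok
        | some p =>
          rw [hx] at hok
          simp only [pvOkB, decide_eq_true_iff] at hok ⊢
          exact not_le.mp hok
      simp only [hb, if_true]
      rw [if_neg (by
        intro hall
        have h0 := hall 0 (by simp only [List.length_cons]; omega)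
        rw [Nat.add_zero, hgd] at h0
        exact hok (by simpa using h0))]

theorem pvOk_pairwise (o : Option Char) (c : Char) (t : List Char) (h : pvOkB o c = true) :
    List.Pairwise (· ≤ ·) (pvOptL o ++ c :: t) ↔ List.Pairwise (· ≤ ·) (c :: t) := by
  cases o with
  | none => simp [pvOptL]
  | some p =>
    have hp : p ≤ c := by simpa [pvOkB] using h
    simp only [pvOptL, List.cons_append, List.nil_append]
    constructor
    · exact fun h2 => h2.of_cons
    · intro h2
      refine List.pairwise_cons.mpr ⟨?_, h2⟩
      intro x hx
      rcases List.mem_cons.mp hx with rfl | hx'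
      · exact hp
      · have h3 := List.rel_of_pairwise_cons h2 hx'
        exact le_trans hp h3

theorem pvBLoop_spec (rows : List String) : ∀ (last : List (Option Char)),
    (∀ r ∈ rows, r.length ≤ last.length) →
    pvBLoop rows last =
      if ∀ i, i < last.length →
            List.Pairwise (· ≤ ·) (pvOptL (last.getD i none) ++ pvCol i (rows.map pvSortF))
      then "YES" else "NO" := by
  induction rows with
  | nil =>
    intro last h
    simp only [pvBLoop, List.map_nil]
    rw [if_pos]
    intro i hi
    cases hx : last.getD i none <;> simp [pvCol, pvOptL]
  | cons row rest ih =>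
    intro last h
    simp only [pvBLoop, List.map_cons]
    have hrow : row.length ≤ last.length := h row List.mem_cons_self
    have hs : (pvSortF row).length = row.length := pvSortF_length row
    rw [show PySem.List.sorted row.toList (fun c => c) false = pvSortF row from rfl]
    rw [pvRowLoop_spec _ _ 0 (by omega)]
    by_cases hok : ∀ j, j < (pvSortF row).length → pvOkB (last.getD (0 + j) none) ((pvSortF row).getD j 'a') = true
    · rw [if_pos hok]
      show pvBLoop rest (pvWriteSeg last (pvSortF row) 0) =
        if ∀ i, i < last.length →
              List.Pairwise (· ≤ ·) (pvOptL (last.getD i none) ++ pvCol i (pvSortF row :: rest.map pvSortF))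
        then "YES" else "NO"
      rw [ih _ (by intro r hr; rw [pvWriteSeg_length]; exact h r (List.mem_cons_of_mem _ hr))]
      have hcond : (∀ i, i < (pvWriteSeg last (pvSortF row) 0).length →
            List.Pairwise (· ≤ ·) (pvOptL ((pvWriteSeg last (pvSortF row) 0).getD i none) ++ pvCol i (rest.map pvSortF))) ↔
          (∀ i, i < last.length →
            List.Pairwise (· ≤ ·) (pvOptL (last.getD i none) ++ pvCol i (pvSortF row :: rest.map pvSortF))) := by
        rw [pvWriteSeg_length]
        apply forall_congr'
        intro i
        apply imp_congr_right
        intro hi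
        rw [pvWriteSeg_getD _ _ _ _ (by omega)]
        by_cases hlt : i < (pvSortF row).length
        · rw [if_pos (by constructor <;> omega)]
          rw [pvCol_cons_lt _ _ _ hlt, Nat.sub_zero]
          rw [pvOk_pairwise _ _ _ (by simpa using hok i (by omega))]
          simp [pvOptL]
        · rw [if_neg (by omega)]
          rw [pvCol_cons_ge _ _ _ (by omega)]
      rw [if_congr hcond rfl rfl]
    · rw [if_neg hok]
      show "NO" = if ∀ i, i < last.length →
              List.Pairwise (· ≤ ·) (pvOptL (last.getD i none) ++ pvCol i (pvSortF row :: rest.map pvSortF))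
        then "YES" else "NO"
      rw [if_neg]
      intro hall
      apply hok
      intro j hj
      have hpw := hall j (by omega)
      rw [pvCol_cons_lt _ _ _ hj] at hpw
      rw [Nat.zero_add]
      cases hx : last.getD j none with
      | none => rfl
      | some p =>
        rw [hx] at hpw
        simp only [pvOptL, List.cons_append, List.nil_append, List.pairwise_cons] at hpw
        simp only [pvOkB, decide_eq_true_iff]
        exact hpw.1 _ List.mem_cons_self

-- ===== VERDICT (by name: the statement is the Claim_ definition above) =====
theorem gridChallenge_spec : Claim_equal_gridChallenge := by
  intro grid _ hpre
  obtain ⟨hne, hlen⟩ := hpre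
  show gridChallenge grid = gridChallenge_alt grid
  cases grid with
  | nil => exact absurd rfl hne
  | cons r0 rs =>
    have hlen' : ∀ s ∈ r0 :: rs, s.length ≤ r0.length := by simpa using hlen
    simp only [gridChallenge, gridChallenge_alt]
    rw [pvFill_snd, pvCheckCols_eq]
    rw [pvBLoop_spec _ _ (by intro r hr; rw [List.length_replicate]; exact hlen' r hr)]
    have hrep : ∀ i : Nat, (List.replicate r0.length (none : Option Char)).getD i none = none := by
      intro i
      rcases lt_or_ge i r0.length with hi | hi
      · simp [List.getD_eq_getElem?_getD, hi]
      · simp [List.getD_eq_getElem?_getD]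
    have hcglen : ((r0 :: rs).foldl pvFillF (List.replicate r0.length "")).length = r0.length := by
      rw [pvFill_length, List.length_replicate]
    have hcg : ∀ i, i < r0.length →
        (((r0 :: rs).foldl pvFillF (List.replicate r0.length "")).getD i "").toList =
          pvCol i ((r0 :: rs).map pvSortF) := by
      intro i hi
      rw [pvFill_getD _ _ _ (by intro r hr; rw [List.length_replicate]; exact hlen' r hr)
        (by rwa [List.length_replicate])]
      have : (List.replicate r0.length "").getD i "" = "" := by
        simp [List.getD_eq_getElem?_getD, hi]
      rw [this]
      simp
    have hcond : (∀ y ∈ (r0 :: rs).foldl pvFillF (List.replicate r0.length ""),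
          y.toList.Pairwise (· ≤ ·)) ↔
        (∀ i, i < (List.replicate r0.length (none : Option Char)).length →
          List.Pairwise (· ≤ ·) (pvOptL ((List.replicate r0.length (none : Option Char)).getD i none) ++
            pvCol i ((r0 :: rs).map pvSortF))) := by
      constructor
      · intro ha i hi
        rw [List.length_replicate] at hi
        rw [hrep]
        simp only [pvOptL, List.nil_append]
        rw [← hcg i hi]
        apply ha
        have hilen : i < ((r0 :: rs).foldl pvFillF (List.replicate r0.length "")).length := by omega
        rw [List.getD_eq_getElem _ _ hilen]
        exact List.getElem_mem hilen
      · intro hb y hy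
        obtain ⟨i, hilen, hyi⟩ := List.mem_iff_getElem.mp hy
        have hi : i < r0.length := by omega
        have h1 := hb i (by rwa [List.length_replicate])
        rw [hrep] at h1
        simp only [pvOptL, List.nil_append] at h1
        rw [← hyi, ← List.getD_eq_getElem _ _ hilen]
        rw [hcg i hi]
        exact h1
    rw [if_congr hcond rfl rfl]
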